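-- pv_equiv track=rewrite | github.com/SigalHu/jenkins-pipeline | common/args_utils.py | parse_args_to_dict
-- ===== SOURCE A (Python) =====
-- def parse_args_to_dict(args: list, default_dict=None) -> dict:
--     if default_dict is None:
--         default_dict = {}
--     args_dict = {}
--     for ii in range(2, len(args), 2):
--         args_dict[args[ii - 1]] = args[ii]
--     for k, v in default_dict.items():
--         if k not in args_dict.keys():
--             args_dict[k] = v
--     return args_dict
-- ===== SOURCE B (Python) =====
-- def parse_args_to_dict(args: list, default_dict=None) -> dict:
--     # Single pass with a pending-key toggle (no index arithmetic), then merge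
--     # the missing defaults in one shot via a filtered comprehension and dict union.
--     parsed = {}
--     pending = None
--     have_key = False
--     for x in args[1:]:
--         if have_key:
--             parsed[pending] = x
--             have_key = False
--         else:
--             pending = x
--             have_key = True
--     return parsed | {k: v for k, v in (default_dict or {}).items() if k not in parsed}
-- ===== Notes on version B (the rewrite author's own statement) =====
-- stated objective: alternative
-- what changed: B replaces A's index-arithmetic loop over range(2, len(args), 2) by a single index-free pass over args[1:] driven by a pending-key toggle, and replaces A's mutating membership-test loop over the defaults by a filtered dict comprehension merged in one shot with the dict-union operator.
import Mathlib
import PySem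

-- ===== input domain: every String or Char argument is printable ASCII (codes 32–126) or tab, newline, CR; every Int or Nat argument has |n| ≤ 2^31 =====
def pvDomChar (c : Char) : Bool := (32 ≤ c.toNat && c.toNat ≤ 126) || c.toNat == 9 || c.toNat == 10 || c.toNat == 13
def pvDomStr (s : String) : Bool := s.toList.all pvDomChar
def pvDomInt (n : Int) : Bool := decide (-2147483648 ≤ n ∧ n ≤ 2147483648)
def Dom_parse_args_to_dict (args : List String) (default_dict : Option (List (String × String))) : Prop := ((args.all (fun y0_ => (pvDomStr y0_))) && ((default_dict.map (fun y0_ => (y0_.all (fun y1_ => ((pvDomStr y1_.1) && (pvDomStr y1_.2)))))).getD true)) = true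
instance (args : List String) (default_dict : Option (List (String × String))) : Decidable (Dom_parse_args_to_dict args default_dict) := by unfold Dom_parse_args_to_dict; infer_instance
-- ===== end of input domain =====

-- B replaces A's index loop range(2, len(args), 2) by an index-free single pass over args[1:]
-- with a pending-key toggle, and merges missing defaults in one shot via a filtered
-- comprehension and dict union instead of A's mutating membership-test loop (objective: alternative).

-- ===== PORT A =====
-- for ii in range(2, len(args), 2): args_dict[args[ii-1]] = args[ii]   (indices always in range,
-- so pyGetD's default is never used); then defaults are added where the key is absent.
def parse_args_to_dict (args : List String) (default_dict : Option (List (String × String))) : List (String × String) :=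
  let dd : PySem.Dict String String := PySem.Dict.ofList (default_dict.getD [])
  let args_dict : PySem.Dict String String :=
    (PySem.List.pyRange 2 (args.length : Int) 2).foldl
      (fun d ii => d.insert (PySem.List.pyGetD args (ii - 1) "") (PySem.List.pyGetD args ii ""))
      PySem.Dict.empty
  (dd.items.foldl (fun d kv => if d.contains kv.1 then d else d.insert kv.1 kv.2) args_dict).items

-- ===== PORT B =====
-- the for-loop state is (parsed, pending/have_key); Python's pending=None + have_key flag is the Option;
-- 'parsed | {k: v for k, v in (default_dict or {}).items() if k not in parsed}': the comprehension is
-- Dict.ofList of the filtered items, and '|' folds its items into parsed by insert.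
def parse_args_to_dict_alt (args : List String) (default_dict : Option (List (String × String))) : List (String × String) :=
  let st := (args.drop 1).foldl
      (fun st x => match st.2 with
        | some k => (st.1.insert k x, (none : Option String))
        | none => (st.1, some x))
      ((PySem.Dict.empty : PySem.Dict String String), (none : Option String))
  let parsed := st.1
  let extra : PySem.Dict String String :=
    PySem.Dict.ofList (((PySem.Dict.ofList (default_dict.getD [])).items).filter
      (fun kv => !(parsed.contains kv.1)))
  (extra.items.foldl (fun d kv => d.insert kv.1 kv.2) parsed).items

-- ===== PRECONDITION & SPEC =====
def Spec_parse_args_to_dict (args : List String) (default_dict : Option (List (String × String))) (out : List (String × String)) : Prop := out = parse_args_to_dict_alt args default_dict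
instance (args : List String) (default_dict : Option (List (String × String))) (out : List (String × String)) : Decidable (Spec_parse_args_to_dict args default_dict out) := by unfold Spec_parse_args_to_dict; infer_instance

-- ===== CLAIM (what is proved, stated in full; the proofs are below) =====
def Claim_equal_parse_args_to_dict : Prop := ∀ (args : List String) (default_dict : Option (List (String × String))), Dom_parse_args_to_dict args default_dict → Spec_parse_args_to_dict args default_dict (parse_args_to_dict args default_dict)

-- ===== LEMMAS AND PROOFS =====

-- the pair list both first stages process: consecutive pairs of a list
def pvPairs : List String → List (String × String)
  | a :: b :: r => (a, b) :: pvPairs r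
  | _ => []

-- B's toggle pass computes the fold of insert over the consecutive pairs
theorem toggle_eq_pairs : ∀ (l : List String) (d : PySem.Dict String String),
    (l.foldl
      (fun st x => match st.2 with
        | some k => (st.1.insert k x, (none : Option String))
        | none => (st.1, some x))
      (d, (none : Option String))).1
    = (pvPairs l).foldl (fun d kv => d.insert kv.1 kv.2) d
  | [], _ => rfl
  | [_], _ => rfl
  | a :: b :: r, d => toggle_eq_pairs r (d.insert a b)

-- pvPairs as a range map (so it can be compared with A's range loop)
theorem pvPairs_eq_range : ∀ (l : List String),
    pvPairs l = (List.range (l.length / 2)).map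
      (fun k => (l.getD (2 * k) "", l.getD (2 * k + 1) ""))
  | [] => by simp [pvPairs]
  | [a] => by simp [pvPairs]
  | a :: b :: r => by
    have ih := pvPairs_eq_range r
    have hlen : (a :: b :: r).length / 2 = r.length / 2 + 1 := by
      simp [List.length_cons]; omega
    rw [hlen, List.range_succ_eq_map, List.map_cons, List.map_map]
    show (a, b) :: pvPairs r = _
    refine congrArg₂ List.cons (by simp) ?_
    rw [ih]
    apply List.map_congr_left
    intro k _
    simp only [Function.comp_apply]
    have e1 : 2 * (k + 1) = 2 * k + 1 + 1 := by ring
    rw [e1]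
    simp

-- range(2, len(args), 2) as a plain List.range
theorem pyRange_two_eq (n : ℕ) :
    PySem.List.pyRange 2 (n:ℤ) 2 = (List.range ((n-1)/2)).map (fun k : ℕ => (2 + 2*k : ℤ)) := by
  have hc : (if (0:ℤ) < 2 then if (2:ℤ) < (n:ℤ) then (((n:ℤ) - 2 + 2 - 1) / 2).toNat else 0
      else if (n:ℤ) < 2 then (((2:ℤ) - (n:ℤ) + -2 - 1) / -2).toNat else 0) = (n-1)/2 := by
    split_ifs <;> omega
  simp only [PySem.List.pyRange, if_neg (show ¬((2:ℤ) = 0) by norm_num)]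
  rw [hc]

-- getD after dropping the first element
theorem getD_drop_one (xs : List String) (i : ℕ) (dflt : String) :
    (xs.drop 1).getD i dflt = xs.getD (1 + i) dflt := by
  rw [Nat.add_comm 1 i]
  simp [List.getD_eq_getElem?_getD]

-- the pair list A reads off by index IS pvPairs (args.drop 1)
theorem a_pairs_eq (xs : List String) :
    (PySem.List.pyRange 2 (xs.length : Int) 2).map
      (fun ii => (PySem.List.pyGetD xs (ii - 1) "", PySem.List.pyGetD xs ii ""))
    = pvPairs (xs.drop 1) := by
  rw [pyRange_two_eq, pvPairs_eq_range, List.map_map]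
  have hlen : (xs.drop 1).length / 2 = (xs.length - 1) / 2 := by simp
  rw [hlen]
  apply List.map_congr_left
  intro k _
  simp only [Function.comp_apply]
  rw [getD_drop_one, getD_drop_one]
  have e1 : ((2:ℤ) + 2*(k:ℕ)) - 1 = ((1 + 2*k : ℕ) : ℤ) := by push_cast; ring
  have e2 : ((2:ℤ) + 2*(k:ℕ)) = ((1 + (2*k+1) : ℕ) : ℤ) := by push_cast; ring
  rw [e1, e2, PySem.List.pyGetD_natCast, PySem.List.pyGetD_natCast]

-- A's first loop builds exactly B's parsed dict
theorem stage1_eq (xs : List String) :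
    (PySem.List.pyRange 2 (xs.length : Int) 2).foldl
        (fun d ii => d.insert (PySem.List.pyGetD xs (ii - 1) "") (PySem.List.pyGetD xs ii ""))
        PySem.Dict.empty
    = ((xs.drop 1).foldl
        (fun st x => match st.2 with
          | some k => (st.1.insert k x, (none : Option String))
          | none => (st.1, some x))
        ((PySem.Dict.empty : PySem.Dict String String), (none : Option String))).1 := by
  rw [toggle_eq_pairs, ← a_pairs_eq, List.foldl_map]

-- A's guarded-insert loop equals a plain insert loop over the pre-filtered items,
-- provided the looped keys are pairwise distinct
theorem guarded_eq_filter_insert (l : List (String × String)) (d : PySem.Dict String String)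
    (h : (l.map (·.1)).Nodup) :
    l.foldl (fun d kv => if d.contains kv.1 then d else d.insert kv.1 kv.2) d
    = (l.filter (fun kv => !(d.contains kv.1))).foldl (fun d kv => d.insert kv.1 kv.2) d := by
  induction l generalizing d with
  | nil => rfl
  | cons kv tl ih =>
    rw [List.map_cons] at h
    obtain ⟨h1, h2⟩ := List.nodup_cons.mp h
    rw [List.foldl_cons, List.filter_cons]
    by_cases hc : d.contains kv.1 = true
    · rw [if_pos hc, if_neg (show ¬((!d.contains kv.1) = true) by simp [hc])]
      exact ih d h2
    · have hc' : d.contains kv.1 = false := by simpa using hc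
      rw [if_neg hc, if_pos (show (!d.contains kv.1) = true by simp [hc']), List.foldl_cons]
      rw [ih (d.insert kv.1 kv.2) h2]
      congr 1
      apply List.filter_congr
      intro kv' hkv'
      have hne : kv'.1 ≠ kv.1 := fun he => h1 (he ▸ List.mem_map_of_mem hkv')
      rw [PySem.Dict.contains_insert]
      simp [hne]

-- Dict.ofList of a list with pairwise-distinct keys has exactly that items list
theorem items_ofList_of_nodup (l : List (String × String)) (h : (l.map (·.1)).Nodup) :
    (PySem.Dict.ofList l).items = l := by
  have := PySem.Dict.items_foldl_insert_fresh (l := l) (k := (·.1)) (v := (·.2))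
    (d := (PySem.Dict.empty : PySem.Dict String String)) (by simp) h
  simpa using this

-- the defaults' items carry pairwise-distinct keys
theorem nodup_keys_items_ofList (dl : List (String × String)) :
    (((PySem.Dict.ofList dl).items : List (String × String)).map (·.1)).Nodup := by
  have := PySem.Dict.nodup_keys_ofList (ps := dl) (κ := String) (ν := String)
  simpa [PySem.Dict.keys] using this

-- filtering preserves distinctness of the keys
theorem nodup_filter_keys (dl : List (String × String)) (p : String × String → Bool) :
    (((PySem.Dict.ofList dl).items.filter p).map (·.1)).Nodup := by
  have hnd := nodup_keys_items_ofList dl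
  exact hnd.sublist (List.filter_sublist.map (fun kv : String × String => kv.1))

-- ===== VERDICT (by name: the statement is the Claim_ definition above) =====
theorem parse_args_to_dict_spec : Claim_equal_parse_args_to_dict := by
  intro args default_dict _
  unfold Spec_parse_args_to_dict parse_args_to_dict parse_args_to_dict_alt
  dsimp only
  rw [stage1_eq]
  rw [guarded_eq_filter_insert _ _ (nodup_keys_items_ofList (default_dict.getD []))]
  rw [items_ofList_of_nodup _ (nodup_filter_keys (default_dict.getD []) _)]
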